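-- pv_equiv track=rewrite | github.com/zhangheng18/LeetCode | python/877. 石子游戏.py | dp
-- ===== SOURCE A (Python) =====
-- from dataclasses import dataclass
--
-- @dataclass
-- class Pair:
--     first: int
--     second: int
--     __solt__ = ('first', 'second')
--
-- def dp(piles):
--     n = len(piles)
--
--     dp = [[Pair(0, 0) for _ in range(n)] for _ in range(n)]
--
--     # base
--     for i in range(n):
--         dp[i][i].first = piles[i]
--         dp[i][i].second = 0
--
--     # dp[i][j] 用到dp[i+1][j]和 dp[i][j-1] 倒序遍历
--     for i in range(n - 2, -1, -1):
--         for j in range(i + 1, n):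
--             # 选左边
--             left = piles[i] + dp[i + 1][j].second
--             # 选右边
--             right = piles[j] + dp[i][j - 1].second
--
--             if left > right:
--                 # Alice
--                 dp[i][j].first = left
--                 # Bob
--                 dp[i][j].second = dp[i + 1][j].first
--             else:
--                 dp[i][j].first = right
--                 dp[i][j].second = dp[i][j - 1].first
--     res = dp[0][n - 1]
--     return res.first - res.second
-- ===== SOURCE B (Python) =====
-- from functools import lru_cache
--
-- def dp(piles):
--     n = len(piles)
--
--     @lru_cache(maxsize=None)
--     def f(i, j):
--         if i == j:
--             return piles[i]
--         return max(piles[i] - f(i + 1, j), piles[j] - f(i, j - 1))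
--
--     return f(0, n - 1)
-- ===== Notes on version B (the rewrite author's own statement) =====
-- stated objective: simpler
-- what changed: Replaces A's bottom-up table of (first,second) score pairs filled by a reversed double loop with a top-down memoized recursion that maintains a single scalar score-difference per interval.
import Mathlib
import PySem

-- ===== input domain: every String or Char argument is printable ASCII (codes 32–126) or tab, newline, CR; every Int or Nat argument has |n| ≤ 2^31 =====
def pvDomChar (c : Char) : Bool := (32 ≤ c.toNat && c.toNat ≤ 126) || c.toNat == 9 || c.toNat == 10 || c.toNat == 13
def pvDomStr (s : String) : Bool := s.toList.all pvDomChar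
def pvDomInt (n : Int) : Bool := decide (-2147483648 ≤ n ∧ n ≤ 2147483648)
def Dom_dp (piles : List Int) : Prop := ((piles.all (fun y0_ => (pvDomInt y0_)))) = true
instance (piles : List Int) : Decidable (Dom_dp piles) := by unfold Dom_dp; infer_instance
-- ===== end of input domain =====

-- B replaces A's bottom-up table of (first,second) pairs with a top-down memoized
-- recursion keeping one scalar score-difference per interval (objective: simpler).


-- ===== PORT A =====
-- dp[i][j] is a Pair (first, second); the table is a list of rows, a row a list of pairs.
def tget (t : List (List (Int × Int))) (i j : Nat) : Int × Int :=
  (t.getD i []).getD j (0, 0)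

def tset (t : List (List (Int × Int))) (i j : Nat) (v : Int × Int) :
    List (List (Int × Int)) :=
  t.set i ((t.getD i []).set j v)

-- 'dp[i][j].first = x' / 'dp[i][j].second = x' : update one field of the pair in place
def tsetF (t : List (List (Int × Int))) (i j : Nat) (x : Int) : List (List (Int × Int)) :=
  tset t i j (x, (tget t i j).2)

def tsetS (t : List (List (Int × Int))) (i j : Nat) (x : Int) : List (List (Int × Int)) :=
  tset t i j ((tget t i j).1, x)

def dp (piles : List Int) : Int :=
  let n := piles.length
  let t0 : List (List (Int × Int)) := List.replicate n (List.replicate n ((0:Int), (0:Int)))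
  -- base: for i in range(n): dp[i][i].first = piles[i]; dp[i][i].second = 0
  let t1 := (PySem.List.pyRange 0 (n:Int) 1).foldl
    (fun t i => tsetS (tsetF t i.toNat i.toNat (PySem.List.pyGetD piles i 0)) i.toNat i.toNat 0) t0
  -- for i in range(n-2, -1, -1): for j in range(i+1, n): …
  let t2 := (PySem.List.pyRange ((n:Int) - 2) (-1) (-1)).foldl
    (fun t i =>
      (PySem.List.pyRange (i + 1) (n:Int) 1).foldl
        (fun t j =>
          let left := PySem.List.pyGetD piles i 0 + (tget t (i+1).toNat j.toNat).2
          let right := PySem.List.pyGetD piles j 0 + (tget t i.toNat (j-1).toNat).2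
          if left > right then
            let t' := tsetF t i.toNat j.toNat left
            tsetS t' i.toNat j.toNat (tget t' (i+1).toNat j.toNat).1
          else
            let t' := tsetF t i.toNat j.toNat right
            tsetS t' i.toNat j.toNat (tget t' i.toNat (j-1).toNat).1) t) t1
  let res := tget t2 0 ((n:Int) - 1).toNat
  res.1 - res.2

-- ===== PORT B =====
-- f(i, j): optimal score difference on piles[i..j]; fuel only makes the recursion
-- structurally terminating (fuel = interval length suffices, matching Source B's call tree).
def fB (piles : List Int) : Nat → Int → Int → Int
  | 0, _, _ => 0
  | fuel + 1, i, j =>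
    if i = j then PySem.List.pyGetD piles i 0
    else max (PySem.List.pyGetD piles i 0 - fB piles fuel (i + 1) j)
             (PySem.List.pyGetD piles j 0 - fB piles fuel i (j - 1))

def dp_alt (piles : List Int) : Int :=
  fB piles piles.length 0 ((piles.length : Int) - 1)

-- ===== PRECONDITION & SPEC =====
-- Pre_ excludes only the empty list, on which A raises IndexError (dp[0][-1] on an empty table).
def Pre_dp (piles : List Int) : Prop := piles ≠ []
instance (piles : List Int) : Decidable (Pre_dp piles) := by unfold Pre_dp; infer_instance

def pvWitness_dp : List Int := [5, 3, 4, 5]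

def Spec_dp (piles : List Int) (out : Int) : Prop := out = dp_alt piles
instance (piles : List Int) (out : Int) : Decidable (Spec_dp piles out) := by unfold Spec_dp; infer_instance

-- ===== CLAIM (what is proved, stated in full; the proofs are below) =====
def Claim_equal_dp : Prop := ∀ (piles : List Int), Dom_dp piles → Pre_dp piles → Spec_dp piles (dp piles)

-- ===== LEMMAS AND PROOFS =====

-- Pure specification of A's table cell dp[i][i+d] (a pair), by recursion on the interval width.
def P (piles : List Int) : Nat → Nat → Int × Int
  | 0, i => (piles.getD i 0, 0)
  | d + 1, i =>
    if piles.getD i 0 + (P piles d (i + 1)).2 > piles.getD (i + d + 1) 0 + (P piles d i).2 then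
      (piles.getD i 0 + (P piles d (i + 1)).2, (P piles d (i + 1)).1)
    else
      (piles.getD (i + d + 1) 0 + (P piles d i).2, (P piles d i).1)

theorem take_sum_succ (xs : List Int) (d : Nat) :
    (xs.take (d + 1)).sum = (xs.take d).sum + xs.getD d 0 := by
  rw [List.take_add_one, List.sum_append, List.getD_eq_getElem?_getD]
  cases xs[d]? <;> simp

theorem head_sum (piles : List Int) (d i : Nat) :
    ((piles.drop i).take (d + 1 + 1)).sum
      = piles.getD i 0 + ((piles.drop (i + 1)).take (d + 1)).sum := by
  by_cases h : i < piles.length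
  · rw [← List.getElem_cons_drop h, List.take_succ_cons]
    simp [List.getD_eq_getElem?_getD, List.getElem?_eq_getElem h]
  · simp [List.drop_eq_nil_of_le (by omega : piles.length ≤ i),
      List.drop_eq_nil_of_le (by omega : piles.length ≤ i + 1),
      List.getD_eq_getElem?_getD, List.getElem?_eq_none (by omega : piles.length ≤ i)]

theorem sumP (piles : List Int) (d i : Nat) :
    (P piles d i).1 + (P piles d i).2 = ((piles.drop i).take (d + 1)).sum := by
  induction d generalizing i with
  | zero =>
    simp [P, take_sum_succ, List.getD_eq_getElem?_getD, List.getElem?_drop]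
  | succ d ih =>
    have key : ((piles.drop i).take (d + 1 + 1)).sum
        = ((piles.drop i).take (d + 1)).sum + piles.getD (i + d + 1) 0 := by
      rw [take_sum_succ (piles.drop i) (d + 1)]
      simp [List.getD_eq_getElem?_getD, List.getElem?_drop, Nat.add_assoc]
    have head := head_sum piles d i
    have h1 := ih (i + 1)
    have h2 := ih i
    simp only [P]
    split_ifs with h <;> simp only [] <;> omega

-- B's scalar is A's first - second
theorem diffP (piles : List Int) (d : Nat) :
    ∀ (i fuel : Nat), d < fuel →
      fB piles fuel (i : Int) ((i : Int) + d) = (P piles d i).1 - (P piles d i).2 := by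
  induction d with
  | zero =>
    intro i fuel hf
    cases fuel with
    | zero => omega
    | succ f => simp [fB, P]
  | succ d ih =>
    intro i fuel hf
    cases fuel with
    | zero => omega
    | succ f =>
      have hne : (i : Int) ≠ (i : Int) + (d + 1 : Nat) := by push_cast; omega
      have e1 : (i : Int) + 1 = ((i + 1 : Nat) : Int) := by push_cast; ring
      have e2 : (i : Int) + ((d + 1 : Nat) : Int) = ((i + 1 : Nat) : Int) + (d : Int) := by
        push_cast; ring
      have e3 : (i : Int) + ((d + 1 : Nat) : Int) - 1 = (i : Int) + (d : Int) := by
        push_cast; ring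
      have ih1 := ih (i + 1) f (by omega)
      have ih2 := ih i f (by omega)
      have hkey : ((piles.drop i).take (d + 1 + 1)).sum
          = ((piles.drop i).take (d + 1)).sum + piles.getD (i + d + 1) 0 := by
        rw [take_sum_succ (piles.drop i) (d + 1)]
        simp [List.getD_eq_getElem?_getD, List.getElem?_drop, Nat.add_assoc]
      have hhead := head_sum piles d i
      have s1 := sumP piles d (i + 1)
      have s0 := sumP piles d i
      have hg : PySem.List.pyGetD piles ((i : Int) + ((d + 1 : Nat) : Int)) 0
          = piles.getD (i + d + 1) 0 := by
        rw [show (i : Int) + ((d + 1 : Nat) : Int) = ((i + d + 1 : Nat) : Int) by push_cast; ring]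
        exact PySem.List.pyGetD_natCast piles (i + d + 1) 0
      simp only [fB]
      rw [if_neg hne, hg, e3, ih2, e1, e2, ih1]
      simp only [PySem.List.pyGetD_natCast, List.getD_eq_getElem?_getD]
      simp only [P, ← List.getD_eq_getElem?_getD]
      split_ifs with h
      · rw [max_eq_left (by omega)]; simp; ring
      · rw [max_eq_right (by omega)]; simp; ring

-- table shape and correctness invariants
def Shape (t : List (List (Int × Int))) (n : Nat) : Prop :=
  t.length = n ∧ ∀ r, r < n → (t.getD r []).length = n

theorem length_tset (t : List (List (Int × Int))) (i j : Nat) (v : Int × Int) :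
    (tset t i j v).length = t.length := by
  simp [tset]

theorem rowlen_tset (t : List (List (Int × Int))) (i j r : Nat) (v : Int × Int) :
    ((tset t i j v).getD r []).length = (t.getD r []).length := by
  by_cases h : r = i
  · subst h
    by_cases hr : r < t.length
    · simp [tset, List.getD_eq_getElem?_getD, List.getElem?_set_self hr]
    · simp [tset, List.set_eq_of_length_le (by omega : t.length ≤ r)]
  · simp [tset, List.getD_eq_getElem?_getD, List.getElem?_set_ne (by omega : i ≠ r)]

theorem tget_tset_self (t : List (List (Int × Int))) (i j : Nat) (v : Int × Int)
    (hi : i < t.length) (hj : j < (t.getD i []).length) :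
    tget (tset t i j v) i j = v := by
  simp [tget, tset, List.getD_eq_getElem?_getD, List.getElem?_set_self hi,
    List.getElem?_set_self (by simpa [List.getD_eq_getElem?_getD] using hj)]

theorem tget_tset_ne (t : List (List (Int × Int))) (i j r c : Nat) (v : Int × Int)
    (h : i ≠ r ∨ j ≠ c) :
    tget (tset t i j v) r c = tget t r c := by
  by_cases hir : i = r
  · subst hir
    have hjc : j ≠ c := by tauto
    by_cases hi : i < t.length
    · simp [tget, tset, List.getD_eq_getElem?_getD, List.getElem?_set_self hi,
        List.getElem?_set_ne hjc]
    · simp [tget, tset, List.set_eq_of_length_le (by omega : t.length ≤ i)]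
  · simp [tget, tset, List.getD_eq_getElem?_getD, List.getElem?_set_ne hir]

theorem tget_write2_self (t : List (List (Int × Int))) (i j : Nat) (x y : Int)
    (hb1 : i < t.length) (hb2 : j < (t.getD i []).length) :
    tget (tsetS (tsetF t i j x) i j y) i j = (x, y) := by
  have hsb1 : i < (tsetF t i j x).length := by
    rw [show tsetF t i j x = tset t i j (x, (tget t i j).2) from rfl, length_tset]
    exact hb1
  have hsb2 : j < ((tsetF t i j x).getD i []).length := by
    rw [show tsetF t i j x = tset t i j (x, (tget t i j).2) from rfl, rowlen_tset]
    exact hb2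
  rw [show tsetS (tsetF t i j x) i j y
      = tset (tsetF t i j x) i j ((tget (tsetF t i j x) i j).1, y) from rfl]
  rw [tget_tset_self _ _ _ _ hsb1 hsb2]
  rw [show tsetF t i j x = tset t i j (x, (tget t i j).2) from rfl,
    tget_tset_self _ _ _ _ hb1 hb2]

theorem tget_write2_ne (t : List (List (Int × Int))) (i j r c : Nat) (x y : Int)
    (hne : i ≠ r ∨ j ≠ c) :
    tget (tsetS (tsetF t i j x) i j y) r c = tget t r c := by
  rw [show tsetS (tsetF t i j x) i j y
      = tset (tsetF t i j x) i j ((tget (tsetF t i j x) i j).1, y) from rfl,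
    tget_tset_ne _ _ _ _ _ _ hne,
    show tsetF t i j x = tset t i j (x, (tget t i j).2) from rfl,
    tget_tset_ne _ _ _ _ _ _ hne]

-- loop bodies of A's port, named for the proofs (definitionally the lambdas in dp)
def bodyBase (piles : List Int) (t : List (List (Int × Int))) (i : Int) :
    List (List (Int × Int)) :=
  tsetS (tsetF t i.toNat i.toNat (PySem.List.pyGetD piles i 0)) i.toNat i.toNat 0

def bodyInner (piles : List Int) (i : Int) (t : List (List (Int × Int))) (j : Int) :
    List (List (Int × Int)) :=
  let left := PySem.List.pyGetD piles i 0 + (tget t (i+1).toNat j.toNat).2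
  let right := PySem.List.pyGetD piles j 0 + (tget t i.toNat (j-1).toNat).2
  if left > right then
    let t' := tsetF t i.toNat j.toNat left
    tsetS t' i.toNat j.toNat (tget t' (i+1).toNat j.toNat).1
  else
    let t' := tsetF t i.toNat j.toNat right
    tsetS t' i.toNat j.toNat (tget t' i.toNat (j-1).toNat).1

def bodyOuter (piles : List Int) (t : List (List (Int × Int))) (i : Int) :
    List (List (Int × Int)) :=
  (PySem.List.pyRange (i + 1) (piles.length : Int) 1).foldl (bodyInner piles i) t

-- invariants: rows above k (plus the diagonal) hold the spec pairs; inner: row i filled up to m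
def OutInv (piles : List Int) (t : List (List (Int × Int))) (k : Nat) : Prop :=
  Shape t piles.length ∧
  ∀ r c : Nat, r < piles.length → c < piles.length → r ≤ c → (k ≤ r ∨ r = c) →
    tget t r c = P piles (c - r) r

def InnInv (piles : List Int) (t : List (List (Int × Int))) (i m : Nat) : Prop :=
  Shape t piles.length ∧
  ∀ r c : Nat, r < piles.length → c < piles.length → r ≤ c →
    (i + 1 ≤ r ∨ r = c ∨ (r = i ∧ c < m)) → tget t r c = P piles (c - r) r

theorem shape_tset (t : List (List (Int × Int))) (n i j : Nat) (v : Int × Int)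
    (h : Shape t n) : Shape (tset t i j v) n := by
  refine ⟨by rw [length_tset]; exact h.1, fun r hr => ?_⟩
  rw [rowlen_tset]; exact h.2 r hr

theorem base_step (piles : List Int) (a : Int) (t : List (List (Int × Int)))
    (h0 : 0 ≤ a) (ha : a < (piles.length : Int)) (hs : Shape t piles.length) :
    Shape (bodyBase piles t a) piles.length ∧
    tget (bodyBase piles t a) a.toNat a.toNat = (piles.getD a.toNat 0, 0) ∧
    ∀ r c : Nat, (r ≠ a.toNat ∨ c ≠ a.toNat) →
      tget (bodyBase piles t a) r c = tget t r c := by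
  have han : a.toNat < piles.length := by omega
  have h1 : a.toNat < t.length := by rw [hs.1]; exact han
  have h2 : a.toNat < (t.getD a.toNat []).length := by rw [hs.2 a.toNat han]; exact han
  have hsF : Shape (tsetF t a.toNat a.toNat (PySem.List.pyGetD piles a 0)) piles.length :=
    shape_tset _ _ _ _ _ hs
  have h1' : a.toNat < (tsetF t a.toNat a.toNat (PySem.List.pyGetD piles a 0)).length := by
    rw [hsF.1]; exact han
  have h2' : a.toNat <
      ((tsetF t a.toNat a.toNat (PySem.List.pyGetD piles a 0)).getD a.toNat []).length := by
    rw [hsF.2 a.toNat han]; exact han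
  refine ⟨shape_tset _ _ _ _ _ hsF, ?_, ?_⟩
  · show tget (tset _ a.toNat a.toNat _) a.toNat a.toNat = _
    rw [tget_tset_self _ _ _ _ h1' h2']
    rw [show tget (tsetF t a.toNat a.toNat (PySem.List.pyGetD piles a 0)) a.toNat a.toNat
        = (PySem.List.pyGetD piles a 0, (tget t a.toNat a.toNat).2) from
      tget_tset_self _ _ _ _ h1 h2]
    rw [PySem.List.pyGetD_of_nonneg _ _ h0]
  · intro r c hrc
    have hne : a.toNat ≠ r ∨ a.toNat ≠ c := by tauto
    show tget (tset _ a.toNat a.toNat _) r c = _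
    rw [tget_tset_ne _ _ _ _ _ _ hne]
    exact tget_tset_ne _ _ _ _ _ _ hne

theorem base_fold (piles : List Int) :
    ∀ (k : Nat) (a : Int) (t : List (List (Int × Int))), 0 ≤ a →
      a.toNat + k = piles.length → Shape t piles.length →
      (∀ r : Nat, r < a.toNat → tget t r r = (piles.getD r 0, 0)) →
      Shape ((PySem.List.pyRange a (piles.length : Int) 1).foldl (bodyBase piles) t)
          piles.length ∧
      ∀ r : Nat, r < piles.length →
        tget ((PySem.List.pyRange a (piles.length : Int) 1).foldl (bodyBase piles) t) r r
          = (piles.getD r 0, 0) := by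
  intro k
  induction k with
  | zero =>
    intro a t h0 hk hs hdiag
    rw [PySem.List.pyRange_one_eq_nil (by omega)]
    exact ⟨hs, fun r hr => hdiag r (by omega)⟩
  | succ k ih =>
    intro a t h0 hk hs hdiag
    rw [PySem.List.pyRange_one_cons (by omega), List.foldl_cons]
    obtain ⟨hs', hset, hoth⟩ := base_step piles a t h0 (by omega) hs
    refine ih (a + 1) _ (by omega) (by omega) hs' ?_
    intro r hr
    by_cases hra : r = a.toNat
    · subst hra; exact hset
    · rw [hoth r r (Or.inl hra)]; exact hdiag r (by omega)

theorem inner_step (piles : List Int) (i j : Int) (t : List (List (Int × Int)))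
    (hi0 : 0 ≤ i) (hi2 : i ≤ (piles.length : Int) - 2)
    (hj1 : i + 1 ≤ j) (hjn : j < (piles.length : Int))
    (hinv : InnInv piles t i.toNat j.toNat) :
    InnInv piles (bodyInner piles i t j) i.toNat (j.toNat + 1) := by
  obtain ⟨hs, hcell⟩ := hinv
  have hn2 : i.toNat + 1 < piles.length := by omega
  have hjn' : j.toNat < piles.length := by omega
  have hij : i.toNat + 1 ≤ j.toNat := by omega
  have eI : (i + 1).toNat = i.toNat + 1 := by omega
  have eJ : (j - 1).toNat = j.toNat - 1 := by omega
  -- the two reads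
  have hread1 : tget t (i+1).toNat j.toNat = P piles (j.toNat - (i.toNat + 1)) (i.toNat + 1) := by
    rw [eI]; exact hcell _ _ hn2 hjn' hij (Or.inl (le_refl _))
  have hread2 : tget t i.toNat (j-1).toNat = P piles (j.toNat - 1 - i.toNat) i.toNat := by
    rw [eJ]
    exact hcell _ _ (by omega) (by omega) (by omega) (Or.inr (Or.inr ⟨rfl, by omega⟩))
  have hgi : PySem.List.pyGetD piles i 0 = piles.getD i.toNat 0 :=
    PySem.List.pyGetD_of_nonneg _ _ hi0
  have hgj : PySem.List.pyGetD piles j 0 = piles.getD j.toNat 0 :=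
    PySem.List.pyGetD_of_nonneg _ _ (by omega)
  -- bounds for the writes
  have hb1 : i.toNat < t.length := by rw [hs.1]; omega
  have hb2 : j.toNat < (t.getD i.toNat []).length := by rw [hs.2 i.toNat (by omega)]; omega
  -- the target cell value
  have hd : j.toNat - i.toNat = (j.toNat - i.toNat - 1) + 1 := by omega
  have hd1 : j.toNat - (i.toNat + 1) = j.toNat - i.toNat - 1 := by omega
  have hd2 : j.toNat - 1 - i.toNat = j.toNat - i.toNat - 1 := by omega
  have hdj : i.toNat + (j.toNat - i.toNat - 1) + 1 = j.toNat := by omega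
  have hP : P piles (j.toNat - i.toNat) i.toNat =
      if piles.getD i.toNat 0 + (P piles (j.toNat - i.toNat - 1) (i.toNat + 1)).2 >
         piles.getD j.toNat 0 + (P piles (j.toNat - i.toNat - 1) i.toNat).2 then
        (piles.getD i.toNat 0 + (P piles (j.toNat - i.toNat - 1) (i.toNat + 1)).2,
         (P piles (j.toNat - i.toNat - 1) (i.toNat + 1)).1)
      else
        (piles.getD j.toNat 0 + (P piles (j.toNat - i.toNat - 1) i.toNat).2,
         (P piles (j.toNat - i.toNat - 1) i.toNat).1) := by
    rw [hd]; simp only [P, hdj, Nat.add_sub_cancel]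
  -- shape after the two writes
  have hsF : ∀ v, Shape (tsetF t i.toNat j.toNat v) piles.length :=
    fun v => shape_tset _ _ _ _ _ hs
  have hb1' : ∀ v, i.toNat < (tsetF t i.toNat j.toNat v).length := by
    intro v; rw [(hsF v).1]; omega
  have hb2' : ∀ v, j.toNat < ((tsetF t i.toNat j.toNat v).getD i.toNat []).length := by
    intro v; rw [(hsF v).2 i.toNat (by omega)]; omega
  have hread1' : ∀ v, tget (tsetF t i.toNat j.toNat v) (i+1).toNat j.toNat
      = tget t (i+1).toNat j.toNat := by
    intro v; exact tget_tset_ne _ _ _ _ _ _ (Or.inl (by omega))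
  have hread2' : ∀ v, tget (tsetF t i.toNat j.toNat v) i.toNat (j-1).toNat
      = tget t i.toNat (j-1).toNat := by
    intro v; exact tget_tset_ne _ _ _ _ _ _ (Or.inr (by omega))
  constructor
  · simp only [bodyInner]
    split_ifs <;> exact shape_tset _ _ _ _ _ (hsF _)
  · intro r c hr hc hrc hcond
    by_cases hcur : r = i.toNat ∧ c = j.toNat
    · obtain ⟨hri, hcj⟩ := hcur; subst hri; subst hcj
      simp only [bodyInner]
      simp only [hread1', hread2', hread1, hread2, hgi, hgj]
      split_ifs with hlr
      · rw [tget_write2_self _ _ _ _ _ hb1 hb2]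
        rw [hd1] at hlr ⊢; rw [hd2] at hlr
        rw [hP, if_pos hlr]
      · rw [tget_write2_self _ _ _ _ _ hb1 hb2]
        rw [hd1] at hlr; rw [hd2] at hlr ⊢
        rw [hP, if_neg hlr]
    · have hne : i.toNat ≠ r ∨ j.toNat ≠ c := by tauto
      have hunch : tget (bodyInner piles i t j) r c = tget t r c := by
        simp only [bodyInner]
        split_ifs <;> exact tget_write2_ne _ _ _ _ _ _ _ hne
      rw [hunch]
      refine hcell r c hr hc hrc ?_
      rcases hcond with h | h | ⟨hri, hcm⟩
      · exact Or.inl h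
      · exact Or.inr (Or.inl h)
      · refine Or.inr (Or.inr ⟨hri, ?_⟩)
        have : c ≠ j.toNat := by tauto
        omega

theorem inner_fold (piles : List Int) (i : Int)
    (hi0 : 0 ≤ i) (hi2 : i ≤ (piles.length : Int) - 2) :
    ∀ (k : Nat) (j : Int) (t : List (List (Int × Int))), i + 1 ≤ j →
      j ≤ (piles.length : Int) → ((piles.length : Int) - j).toNat = k →
      InnInv piles t i.toNat j.toNat →
      InnInv piles ((PySem.List.pyRange j (piles.length : Int) 1).foldl (bodyInner piles i) t)
        i.toNat piles.length := by
  intro k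
  induction k with
  | zero =>
    intro j t hj1 hjn hk hinv
    rw [PySem.List.pyRange_one_eq_nil (by omega)]
    have : j.toNat = piles.length := by omega
    rwa [this] at hinv
  | succ k ih =>
    intro j t hj1 hjn hk hinv
    rw [PySem.List.pyRange_one_cons (by omega), List.foldl_cons]
    have hstep := inner_step piles i j t hi0 hi2 hj1 (by omega) hinv
    have : (j + 1).toNat = j.toNat + 1 := by omega
    refine ih (j + 1) _ (by omega) (by omega) (by omega) ?_
    rwa [this]

theorem outer_fold (piles : List Int) :
    ∀ (m : Nat) (i : Int) (t : List (List (Int × Int))), -1 ≤ i →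
      i ≤ (piles.length : Int) - 2 → (i + 1).toNat = m →
      OutInv piles t (i + 1).toNat →
      OutInv piles ((PySem.List.pyRange i (-1) (-1)).foldl (bodyOuter piles) t) 0 := by
  intro m
  induction m with
  | zero =>
    intro i t h1 h2 hm hinv
    have : i = -1 := by omega
    subst this
    rw [PySem.List.pyRange_neg_one_eq_nil (by omega)]
    simpa using hinv
  | succ m ih =>
    intro i t h1 h2 hm hinv
    have hi0 : 0 ≤ i := by omega
    rw [PySem.List.pyRange_neg_one_cons (by omega), List.foldl_cons]
    -- one outer iteration: fill row i
    have hstart : InnInv piles t i.toNat (i.toNat + 1) := by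
      refine ⟨hinv.1, fun r c hr hc hrc hcond => ?_⟩
      refine hinv.2 r c hr hc hrc ?_
      rcases hcond with h | h | ⟨hri, hcm⟩
      · exact Or.inl (by omega)
      · exact Or.inr h
      · exact Or.inr (by omega)
    have hrow : InnInv piles (bodyOuter piles t i) i.toNat piles.length := by
      have h1' : (i + 1).toNat = i.toNat + 1 := by omega
      refine inner_fold piles i hi0 h2 ((piles.length : Int) - (i + 1)).toNat (i + 1) t
        (by omega) (by omega) rfl ?_
      rwa [h1']
    have hout : OutInv piles (bodyOuter piles t i) i.toNat := by
      refine ⟨hrow.1, fun r c hr hc hrc hcond => ?_⟩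
      refine hrow.2 r c hr hc hrc ?_
      rcases hcond with h | h
      · rcases Nat.eq_or_lt_of_le h with h' | h'
        · exact Or.inr (Or.inr ⟨h'.symm, hc⟩)
        · exact Or.inl h'
      · exact Or.inr (Or.inl h)
    have : (i - 1 + 1).toNat = i.toNat := by omega
    refine ih (i - 1) _ (by omega) (by omega) (by omega) ?_
    rwa [this]

theorem dp_eq (piles : List Int) :
    dp piles =
      (tget ((PySem.List.pyRange ((piles.length : Int) - 2) (-1) (-1)).foldl (bodyOuter piles)
          ((PySem.List.pyRange 0 (piles.length : Int) 1).foldl (bodyBase piles)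
            (List.replicate piles.length
              (List.replicate piles.length ((0:Int), (0:Int)))))) 0
        ((piles.length : Int) - 1).toNat).1 -
      (tget ((PySem.List.pyRange ((piles.length : Int) - 2) (-1) (-1)).foldl (bodyOuter piles)
          ((PySem.List.pyRange 0 (piles.length : Int) 1).foldl (bodyBase piles)
            (List.replicate piles.length
              (List.replicate piles.length ((0:Int), (0:Int)))))) 0
        ((piles.length : Int) - 1).toNat).2 := rfl

-- ===== VERDICT (by name: the statement is the Claim_ definition above) =====
theorem dp_spec : Claim_equal_dp := by
  intro piles _ hpre
  unfold Spec_dp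
  have hn : 1 ≤ piles.length := by
    cases piles with
    | nil => exact absurd rfl hpre
    | cons a l => simp
  show dp piles = dp_alt piles
  rw [dp_eq]
  have hs0 : Shape (List.replicate piles.length
      (List.replicate piles.length ((0:Int), (0:Int)))) piles.length := by
    refine ⟨List.length_replicate, fun r hr => ?_⟩
    simp [List.getD_eq_getElem?_getD, hr]
  obtain ⟨hs1, hdiag⟩ := base_fold piles piles.length 0 _ (by omega) (by simp) hs0
    (by intro r hr; omega)
  have hout1 : OutInv piles
      ((PySem.List.pyRange 0 (piles.length : Int) 1).foldl (bodyBase piles)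
        (List.replicate piles.length (List.replicate piles.length ((0:Int), (0:Int)))))
      ((piles.length : Int) - 2 + 1).toNat := by
    refine ⟨hs1, fun r c hr hc hrc hcond => ?_⟩
    have hrc' : r = c := by omega
    subst hrc'
    rw [Nat.sub_self]
    exact hdiag r hr
  have hout0 := outer_fold piles ((piles.length : Int) - 2 + 1).toNat
    ((piles.length : Int) - 2) _ (by omega) (by omega) rfl hout1
  have hfinal := hout0.2 0 (piles.length - 1) (by omega) (by omega) (by omega) (Or.inl (by omega))
  rw [show ((piles.length : Int) - 1).toNat = piles.length - 1 by omega]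
  rw [Nat.sub_zero] at hfinal
  rw [hfinal]
  unfold dp_alt
  rw [show ((piles.length : Int) - 1) = ((0 : Nat) : Int) + ((piles.length - 1 : Nat) : Int)
    by push_cast [hn]; ring]
  exact (diffP piles (piles.length - 1) 0 piles.length (by omega)).symm
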